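-- pv_equiv track=rewrite | github.com/FTDfangge/leetcode | production/leetcode/production/leetcode/production/leetcode/production/leetcode/production/leetcode/interview_practice/HUAWEI/HJ017.py | is_valid_command
-- ===== SOURCE A (Python) =====
-- myset = {"W","A","S","D"}
--
-- def is_valid_command(command : str) -> bool:
--     if command.__len__() <= 1:
--         return False
--     else:
--         if command[0] not in myset:
--             return False
--         else:
--             for i in command[1:]:
--                 if i > "9" or i < "0":
--                     return False
--             return True
-- ===== SOURCE B (Python) =====
-- import re
--
-- _CMD_RE = re.compile(r'[WASD][0-9]+')
--
-- def is_valid_command(command: str) -> bool: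
--     return bool(_CMD_RE.fullmatch(command))
-- ===== Notes on version B (the rewrite author's own statement) =====
-- stated objective: idiomatic
-- what changed: Replaced the hand-written length/first-char/loop checks by a single precompiled regular-expression fullmatch ([WASD][0-9]+), ported to Lean as the regex's DFA run by foldl.
import Mathlib
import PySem

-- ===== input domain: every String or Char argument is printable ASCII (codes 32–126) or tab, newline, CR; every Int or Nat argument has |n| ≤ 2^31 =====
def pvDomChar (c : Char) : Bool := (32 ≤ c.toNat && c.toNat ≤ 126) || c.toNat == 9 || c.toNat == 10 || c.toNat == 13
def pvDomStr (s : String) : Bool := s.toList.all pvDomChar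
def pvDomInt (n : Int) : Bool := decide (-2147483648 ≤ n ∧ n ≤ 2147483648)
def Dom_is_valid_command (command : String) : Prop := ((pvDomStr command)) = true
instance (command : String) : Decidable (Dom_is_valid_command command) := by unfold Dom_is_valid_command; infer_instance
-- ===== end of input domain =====

-- B replaces A's hand-written length/first-char/digit-loop checks by a single regex
-- fullmatch of [WASD][0-9]+ (idiomatic; ported here as that regex's DFA run by a fold).


-- ===== PORT A =====
-- myset = {"W","A","S","D"}
def pvMyset : PySem.Set Char := PySem.Set.ofList ['W', 'A', 'S', 'D']

-- the 'for i in command[1:]' loop with its early 'return False'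
def pvALoop : List Char → Bool
  | [] => true
  | c :: rest => if c > '9' ∨ c < '0' then false else pvALoop rest

def is_valid_command (command : String) : Bool :=
  if PySem.Str.len command ≤ 1 then false
  else
    match PySem.Str.pyGet? command 0 with
    | none => false          -- unreachable: length ≥ 2
    | some c =>
      if ¬ PySem.Set.contains pvMyset c then false
      else pvALoop (PySem.Str.slice command (some 1) none).toList

-- ===== PORT B =====
-- Source B matches the regex [WASD][0-9]+ with re.fullmatch; Lean has no regex library,
-- so the compiled pattern is ported exactly as its DFA, run over the string by foldl.
inductive PvDfa
  | start  -- before any character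
  | dir    -- seen [WASD]
  | acc    -- seen [WASD][0-9]+  (the sole accepting state)
  | dead   -- mismatch
deriving DecidableEq

def pvDfaStep : PvDfa → Char → PvDfa
  | .start, c => if c = 'W' ∨ c = 'A' ∨ c = 'S' ∨ c = 'D' then .dir else .dead
  | .dir,   c => if '0' ≤ c ∧ c ≤ '9' then .acc else .dead
  | .acc,   c => if '0' ≤ c ∧ c ≤ '9' then .acc else .dead
  | .dead,  _ => .dead

def is_valid_command_alt (command : String) : Bool :=
  decide (command.toList.foldl pvDfaStep .start = .acc)

-- ===== PRECONDITION & SPEC =====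
def Spec_is_valid_command (command : String) (out : Bool) : Prop := out = is_valid_command_alt command
instance (command : String) (out : Bool) : Decidable (Spec_is_valid_command command out) := by unfold Spec_is_valid_command; infer_instance

-- ===== CLAIM (what is proved, stated in full; the proofs are below) =====
def Claim_equal_is_valid_command : Prop := ∀ (command : String), Dom_is_valid_command command → Spec_is_valid_command command (is_valid_command command)

-- ===== LEMMAS AND PROOFS =====

theorem pvDigit_iff (c : Char) : ('0' ≤ c ∧ c ≤ '9') ↔ ¬ (c > '9' ∨ c < '0') := by
  rw [not_or, not_lt, not_lt]; exact and_comm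

theorem pvDfa_dead_fold (l : List Char) : l.foldl pvDfaStep .dead = .dead := by
  induction l with
  | nil => rfl
  | cons c r ih => simpa [pvDfaStep] using ih

theorem pvDfa_acc_fold (l : List Char) :
    (l.foldl pvDfaStep .acc = .acc) ↔ pvALoop l = true := by
  induction l with
  | nil => simp [pvALoop]
  | cons c r ih =>
    by_cases h : '0' ≤ c ∧ c ≤ '9'
    · simp only [List.foldl_cons, pvDfaStep, if_pos h, pvALoop,
        if_neg ((pvDigit_iff c).mp h)]
      exact ih
    · have hor : c > '9' ∨ c < '0' := not_not.mp (fun hn => h ((pvDigit_iff c).mpr hn))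
      simp [pvDfaStep, if_neg h, pvALoop, hor, pvDfa_dead_fold]

theorem pvDfa_dir_fold (l : List Char) :
    (l.foldl pvDfaStep .dir = .acc) ↔ (l ≠ [] ∧ pvALoop l = true) := by
  cases l with
  | nil => simp
  | cons c r =>
    by_cases h : '0' ≤ c ∧ c ≤ '9'
    · simp only [List.foldl_cons, pvDfaStep, if_pos h, pvALoop,
        if_neg ((pvDigit_iff c).mp h), ne_eq, reduceCtorEq, not_false_eq_true, true_and]
      exact pvDfa_acc_fold r
    · have hor : c > '9' ∨ c < '0' := not_not.mp (fun hn => h ((pvDigit_iff c).mpr hn))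
      simp [pvDfaStep, if_neg h, pvALoop, hor, pvDfa_dead_fold]

theorem pvMyset_mem (c : Char) :
    c ∈ pvMyset ↔ (c = 'W' ∨ c = 'A' ∨ c = 'S' ∨ c = 'D') := by
  simp [pvMyset, PySem.Set.ofList, PySem.Set.add, PySem.Set.empty]

theorem is_valid_command_eq (command : String) :
    is_valid_command command = is_valid_command_alt command := by
  unfold is_valid_command is_valid_command_alt
  cases hcs : command.toList with
  | nil =>
    have hlen : PySem.Str.len command ≤ 1 := by simp [PySem.Str.len_eq, hcs]
    simp [hcs]
  | cons c r =>
    have hget : PySem.Str.pyGet? command 0 = some c := by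
      have := PySem.List.pyGet?_natCast (xs := command.toList) (n := 0)
      simp only [PySem.Str.pyGet?_eq, PySem.Chars.pyGet?_eq_listPyGet?]
      simpa [hcs] using this
    have hslice : (PySem.Str.slice command (some 1) none).toList = r := by
      have := PySem.List.slice_from (xs := command.toList) (a := (1:Nat))
      simp only [PySem.Str.toList_slice, PySem.Chars.slice_eq_listSlice]
      simpa [hcs] using this
    cases r with
    | nil =>
      have hlen : PySem.Str.len command ≤ 1 := by simp [PySem.Str.len_eq, hcs]
      rw [if_pos hlen, List.foldl_cons, List.foldl_nil]
      by_cases hw : c = 'W' ∨ c = 'A' ∨ c = 'S' ∨ c = 'D'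
      · rw [show pvDfaStep .start c = .dir from by simp only [pvDfaStep, if_pos hw]]
        rfl
      · rw [show pvDfaStep .start c = .dead from by simp only [pvDfaStep, if_neg hw]]
        rfl
    | cons c2 r2 =>
      have hlen : ¬ PySem.Str.len command ≤ 1 := by
        simp [PySem.Str.len_eq, hcs]
      rw [if_neg hlen, hget]
      dsimp only
      rw [List.foldl_cons]
      by_cases hw : c = 'W' ∨ c = 'A' ∨ c = 'S' ∨ c = 'D'
      · have hc : pvMyset.contains c = true := by
          rcases hw with h | h | h | h <;> subst h <;> decide
        rw [if_neg (by simpa using hc), hslice]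
        have hstep : pvDfaStep .start c = .dir := by simp only [pvDfaStep, if_pos hw]
        rw [hstep]
        have h2 := pvDfa_dir_fold (c2 :: r2)
        simp only [ne_eq, reduceCtorEq, not_false_eq_true, true_and] at h2
        simp only [h2]
        simp
      · have hc : ¬ pvMyset.contains c = true := by
          intro h; exact hw ((pvMyset_mem c).mp (by simpa using h))
        rw [if_pos hc]
        have hstep : pvDfaStep .start c = .dead := by simp only [pvDfaStep, if_neg hw]
        rw [hstep, pvDfa_dead_fold]
        simp

-- ===== VERDICT (by name: the statement is the Claim_ definition above) =====
theorem is_valid_command_spec : Claim_equal_is_valid_command := by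
  intro command _
  unfold Spec_is_valid_command
  exact is_valid_command_eq command
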